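-- pv_equiv track=rewrite | github.com/perwin/telarchive | telarchive/ing_archive_lapalma.py | FindTelescopesAndInstruments
-- ===== SOURCE A (Python) =====
-- def GetObsTextLines( htmlText ):
-- 	"""
-- 	Given a blob of text returned by the ING La Palma archive, we split it into
-- 	individual lines, replace "&nbsp" with actual spaces, and return a list containing
-- 	only those lines which (we hope) have individual observation info.
-- 	"""
-- 	cleanText = htmlText.replace("&nbsp;", " ")
-- 	lines = cleanText.split("<br>")
-- 	startIndex = -99
-- 	for i in range(len(lines)):
-- 		if lines[i].find("---+---") > 0:
-- 			startIndex = i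
-- 	# remove short lines (e.g, final line which is usually something like "</pre>")
-- 	dlines = [ line for line in lines[startIndex:] if len(line.split("|")) >= 10 ]
-- 	return dlines
--
-- def AddEntry( theDict, telKey, instKey ):
-- 	"""
-- 	Given a pre-existing dictionary, this increments the integer value stored in
-- 		theDict[telKey][instKey]
--
-- 	If no such entry exists in the dictionary, then one is created, with value = 0
-- 	"""
-- 	if telKey not in theDict.keys():
-- 		theDict[telKey] = {instKey: 1}
-- 	else:
-- 		if instKey not in theDict[telKey].keys():
-- 			theDict[telKey][instKey] = 1
-- 		else:
-- 			theDict[telKey][instKey] += 1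
--
-- def FindTelescopesAndInstruments( inputText, nFound=None ):
-- 	"""
-- 	Given HTML input text returned by La Palma ING archive, this returns a
-- 	string summarizing the individual observations by telescope and instrument.
--
-- 	Sample output:
-- 		"WHT -- INGRID (12); INT -- WFC (1)"
--
-- 	Meant to be called from archive_search.py, only when there actually *are*
-- 	observations.
-- 	"""
-- 	msgText = "\n\t\t"
--
-- 	# First, search through HTML text and accumulate finds
-- 	dlines = GetObsTextLines(inputText)
-- 	telDict = {}
-- 	for line in dlines:
-- 		pp = line.split("|")
-- 		telescopeName = pp[5].strip()
-- 		instrumentName = pp[6].strip()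
-- 		AddEntry(telDict, telescopeName, instrumentName)
--
-- 	nTelescope = 0
-- 	for telName in ["WHT", "INT", "JKT"]:
-- 		if telName in telDict.keys():
-- 			if nTelescope > 0:
-- 				msgText += "; "
-- 			msgText += "%s -- " % telName
-- 			instList = list(telDict[telName].keys())
-- 			instList.sort()
-- 			nInstruments = len(instList)
-- 			if nInstruments == 1:
-- 				instName = instList[0]
-- 				msgText += "%s (%d)" % (instName, telDict[telName][instName])
-- 			else:
-- 				for j in range(nInstruments):
-- 					instName = instList[j]
-- 					msgText += "%s (%d)" % (instName, telDict[telName][instName])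
-- 					if (j < (nInstruments - 1)):
-- 						msgText += ", "
-- 			nTelescope += 1
--
-- 	return msgText
-- ===== SOURCE B (Python) =====
-- def FindTelescopesAndInstruments(inputText, nFound=None):
-- 	"""Sort-then-scan reimplementation: collect (telescope-rank, instrument)
-- 	pairs, sort them, and render the summary in one run-length pass over the
-- 	sorted pair list; no count dictionaries at all.  Correct because sorting
-- 	by (rank, instrument) groups equal pairs into runs (run length = count),
-- 	orders instruments alphabetically within a telescope, and orders the
-- 	telescopes WHT, INT, JKT by their rank."""
-- 	order = ["WHT", "INT", "JKT"]
-- 	lines = inputText.replace("&nbsp;", " ").split("<br>")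
-- 	startIndex = -99
-- 	for i in range(len(lines)):
-- 		if lines[i].find("---+---") > 0:
-- 			startIndex = i
-- 	pairs = []
-- 	for line in lines[startIndex:]:
-- 		pp = line.split("|")
-- 		if len(pp) >= 10:
-- 			tel = pp[5].strip()
-- 			if tel in order:
-- 				pairs.append((order.index(tel), pp[6].strip()))
-- 	pairs.sort()
-- 	msg = "\n\t\t"
-- 	prevRank = None
-- 	while pairs:
-- 		rank, inst = pairs[0]
-- 		k = 1
-- 		while k < len(pairs) and pairs[k] == (rank, inst):
-- 			k += 1
-- 		if prevRank is None:
-- 			msg += "%s -- " % order[rank]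
-- 		elif rank == prevRank:
-- 			msg += ", "
-- 		else:
-- 			msg += "; %s -- " % order[rank]
-- 		msg += "%s (%d)" % (inst, k)
-- 		prevRank = rank
-- 		pairs = pairs[k:]
-- 	return msg
-- ===== Notes on version B (the rewrite author's own statement) =====
-- stated objective: alternative
-- what changed: Replaces dictionary counting entirely by a sort-then-scan algorithm: B collects (telescope-rank, instrument) pairs, sorts the pair list, and emits the whole summary in one run-length pass over it (run length = count, rank change emits '; TEL -- ', same rank emits ', '), so AddEntry, the nested dicts, the per-telescope key sort, the nTelescope counter and the nInstruments==1 branch all disappear.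
import Mathlib
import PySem

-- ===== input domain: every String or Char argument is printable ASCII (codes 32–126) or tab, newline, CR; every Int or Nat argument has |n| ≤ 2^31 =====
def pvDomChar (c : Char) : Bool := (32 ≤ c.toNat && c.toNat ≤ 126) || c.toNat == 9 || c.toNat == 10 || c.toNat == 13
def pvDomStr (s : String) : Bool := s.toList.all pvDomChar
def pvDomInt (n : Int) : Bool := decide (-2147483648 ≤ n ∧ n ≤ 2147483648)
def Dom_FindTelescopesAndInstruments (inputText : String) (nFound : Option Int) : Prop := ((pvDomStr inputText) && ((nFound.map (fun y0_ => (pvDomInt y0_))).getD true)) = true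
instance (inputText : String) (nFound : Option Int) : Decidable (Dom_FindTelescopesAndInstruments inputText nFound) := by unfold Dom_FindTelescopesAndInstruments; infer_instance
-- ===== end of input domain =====

-- B drops A's count dictionaries for a sort-then-scan algorithm: it sorts the (telescope-rank,
-- instrument) pairs and renders the summary in one run-length pass (objective: alternative);
-- equal output on all inputs.
-- ===== PORT A =====
-- Port of module helper GetObsTextLines (shared parsing; exact transliteration of A's helper).
def GetObsTextLines (htmlText : String) : List String :=
  let cleanText := PySem.Str.replace htmlText "&nbsp;" " "
  let lines := (PySem.Str.split? cleanText "<br>").getD []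
  let startIndex := (PySem.List.pyRange 0 (lines.length : Int) 1).foldl
      (fun si i => if PySem.Str.find (PySem.List.pyGetD lines i "") "---+---" > 0 then i else si) (-99)
  (PySem.List.slice lines (some startIndex) none).filter
      (fun line => decide (10 ≤ ((PySem.Str.split? line "|").getD []).length))

-- Port of module helper AddEntry (nested-dict increment).
def AddEntry (theDict : PySem.Dict String (PySem.Dict String Int)) (telKey instKey : String) :
    PySem.Dict String (PySem.Dict String Int) :=
  if ¬ (telKey ∈ theDict.keys) then
    theDict.insert telKey (PySem.Dict.ofList [(instKey, 1)])
  else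
    let inner := theDict.getD telKey PySem.Dict.empty
    if ¬ (instKey ∈ inner.keys) then
      theDict.insert telKey (inner.insert instKey 1)
    else
      theDict.insert telKey (inner.insert instKey (inner.getD instKey 0 + 1))

-- A's inner formatting loop 'for j in range(nInstruments): …' as the obvious structural
-- recursion over instList (the 'j < nInstruments-1' separator test = 'rest nonempty').
def renderLoopA (inner : PySem.Dict String Int) (msg : String) : List String → String
  | [] => msg
  | [instName] => msg ++ instName ++ " (" ++ PySem.Int.toStr (inner.getD instName 0) ++ ")"
  | instName :: rest@(_ :: _) =>
      renderLoopA inner (msg ++ instName ++ " (" ++ PySem.Int.toStr (inner.getD instName 0) ++ ")" ++ ", ") rest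

def FindTelescopesAndInstruments (inputText : String) (nFound : Option Int) : String :=
  let msgText := "\n\t\t"
  let dlines := GetObsTextLines inputText
  let telDict := dlines.foldl (fun d line =>
      let pp := (PySem.Str.split? line "|").getD []
      let telescopeName := PySem.Str.strip (PySem.List.pyGetD pp 5 "")
      let instrumentName := PySem.Str.strip (PySem.List.pyGetD pp 6 "")
      AddEntry d telescopeName instrumentName) PySem.Dict.empty
  let final := ["WHT", "INT", "JKT"].foldl (fun (st : String × Int) telName =>
      if telName ∈ telDict.keys then
        let msg := if st.2 > 0 then st.1 ++ "; " else st.1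
        let msg := msg ++ telName ++ " -- "
        let inner := telDict.getD telName PySem.Dict.empty
        let instList := PySem.List.sorted inner.keys (fun x => x) false
        let nInstruments := instList.length
        let msg :=
          if nInstruments = 1 then
            let instName := PySem.List.pyGetD instList 0 ""
            msg ++ instName ++ " (" ++ PySem.Int.toStr (inner.getD instName 0) ++ ")"
          else renderLoopA inner msg instList
        (msg, st.2 + 1)
      else st) (msgText, 0)
  final.1

-- ===== PORT B =====
-- B's 'while pairs:' run-length rendering loop as the obvious recursion on the pair list
-- (the inner 'while pairs[k] == pairs[0]' scan is takeWhile/dropWhile on the tail).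
def renderRuns (order : List String) : String → Option Int → List (Int × String) → String
  | msg, _, [] => msg
  | msg, prevRank, (rank, inst) :: rest =>
      let run := rest.takeWhile (fun q => q == (rank, inst))
      let msg' :=
        match prevRank with
        | none => msg ++ PySem.List.pyGetD order rank "" ++ " -- "
        | some pr =>
            if rank == pr then msg ++ ", "
            else msg ++ "; " ++ PySem.List.pyGetD order rank "" ++ " -- "
      renderRuns order (msg' ++ inst ++ " (" ++ PySem.Int.toStr ((run.length : Int) + 1) ++ ")")
        (some rank) (rest.dropWhile (fun q => q == (rank, inst)))
  termination_by _ _ l => l.length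
  decreasing_by
    simp only [List.length_cons]
    exact Nat.lt_succ_of_le (List.length_dropWhile_le _ _)

def FindTelescopesAndInstruments_alt (inputText : String) (nFound : Option Int) : String :=
  let order : List String := ["WHT", "INT", "JKT"]
  let lines := (PySem.Str.split? (PySem.Str.replace inputText "&nbsp;" " ") "<br>").getD []
  let startIndex := (PySem.List.pyRange 0 (lines.length : Int) 1).foldl
      (fun si i => if PySem.Str.find (PySem.List.pyGetD lines i "") "---+---" > 0 then i else si) (-99)
  let pairs := (PySem.List.slice lines (some startIndex) none).foldl
      (fun (acc : List (Int × String)) line =>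
        let pp := (PySem.Str.split? line "|").getD []
        if 10 ≤ pp.length then
          let tel := PySem.Str.strip (PySem.List.pyGetD pp 5 "")
          if tel ∈ order then
            acc ++ [((((PySem.List.index? order tel).getD 0 : Nat) : Int),
                     PySem.Str.strip (PySem.List.pyGetD pp 6 ""))]
          else acc
        else acc) []
  let sortedPairs := PySem.List.sorted2 pairs (fun p => p.1) (fun p => p.2) false
  renderRuns order "\n\t\t" none sortedPairs

-- ===== PRECONDITION & SPEC =====
def Spec_FindTelescopesAndInstruments (inputText : String) (nFound : Option Int) (out : String) : Prop := out = FindTelescopesAndInstruments_alt inputText nFound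
instance (inputText : String) (nFound : Option Int) (out : String) : Decidable (Spec_FindTelescopesAndInstruments inputText nFound out) := by unfold Spec_FindTelescopesAndInstruments; infer_instance

-- ===== CLAIM (what is proved, stated in full; the proofs are below) =====
def Claim_equal_FindTelescopesAndInstruments : Prop := ∀ (inputText : String) (nFound : Option Int), Dom_FindTelescopesAndInstruments inputText nFound → Spec_FindTelescopesAndInstruments inputText nFound (FindTelescopesAndInstruments inputText nFound)

-- ===== LEMMAS AND PROOFS =====

-- (telescope, instrument) pair extracted from one observation line
def pairOf (line : String) : String × String :=
  (PySem.Str.strip (PySem.List.pyGetD ((PySem.Str.split? line "|").getD []) 5 ""),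
   PySem.Str.strip (PySem.List.pyGetD ((PySem.Str.split? line "|").getD []) 6 ""))

-- A's nested dict, as a fold of a single uniform step
def nestedF (ps : List (String × String)) : PySem.Dict String (PySem.Dict String Int) :=
  ps.foldl (fun d p => d.insert p.1 ((d.getD p.1 PySem.Dict.empty).modify p.2 0 (· + 1))) PySem.Dict.empty

theorem modify_eq_insert_getD {κ ν : Type} [BEq κ] (d : PySem.Dict κ ν) (k : κ) (d0 : ν) (f : ν → ν) :
    d.modify k d0 f = d.insert k (f (d.getD k d0)) := rfl

theorem not_mem_keys_getD {κ ν : Type} [BEq κ] [LawfulBEq κ] (d : PySem.Dict κ ν) (k : κ) (d0 : ν)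
    (h : k ∉ d.keys) : d.getD k d0 = d0 := by
  apply PySem.Dict.getD_of_not_contains
  rw [← Bool.not_eq_true, PySem.Dict.contains_iff_mem_keys]; exact h

theorem addEntry_eq (d : PySem.Dict String (PySem.Dict String Int)) (t i : String) :
    AddEntry d t i = d.insert t ((d.getD t PySem.Dict.empty).modify i 0 (· + 1)) := by
  unfold AddEntry
  rw [modify_eq_insert_getD]
  by_cases ht : t ∈ d.keys
  · by_cases hi : i ∈ (d.getD t PySem.Dict.empty).keys
    · simp [ht, hi]
    · rw [not_mem_keys_getD _ _ _ hi]
      simp [ht, hi]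
  · rw [not_mem_keys_getD _ _ _ ht]
    simp [ht]
    rfl

theorem getD_nestedF (ps : List (String × String)) (t : String) :
    (nestedF ps).getD t PySem.Dict.empty
      = PySem.Dict.counter ((ps.filter (fun p => p.1 == t)).map (fun p => p.2)) := by
  induction ps using List.reverseRecOn with
  | nil => rfl
  | append_singleton qs p ih =>
    unfold nestedF at *
    rw [List.foldl_append]
    simp only [List.foldl_cons, List.foldl_nil]
    by_cases hp : t = p.1
    · rw [PySem.Dict.getD_insert]
      rw [if_pos hp, ← hp, ih]
      rw [List.filter_append, List.map_append]
      simp only [List.filter_cons, List.filter_nil]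
      rw [show (p.1 == t) = true by simp [hp.symm]]
      simp only [if_true, List.map_cons, List.map_nil]
      rw [PySem.Dict.counter_append_singleton]
    · rw [PySem.Dict.getD_insert, if_neg hp, ih]
      rw [List.filter_append]
      simp only [List.filter_cons, List.filter_nil]
      rw [show (p.1 == t) = false from beq_eq_false_iff_ne.mpr (fun h => hp h.symm)]
      simp

theorem keys_nestedF (ps : List (String × String)) :
    (nestedF ps).keys = PySem.Set.ofList (ps.map (fun p => p.1)) := by
  unfold nestedF
  rw [PySem.Dict.keys_foldl_insert_key ps (fun p => p.1)
      (fun d p => (d.getD p.1 PySem.Dict.empty).modify p.2 0 (· + 1)) PySem.Dict.empty]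
  rfl

theorem renderLoopA_eq (inner : PySem.Dict String Int) :
    ∀ (l : List String) (msg : String),
    renderLoopA inner msg l
      = msg ++ PySem.Str.join ", " (l.map (fun i => i ++ " (" ++ PySem.Int.toStr (inner.getD i 0) ++ ")")) := by
  intro l
  induction l with
  | nil =>
    intro msg
    apply String.ext
    simp [renderLoopA, PySem.Str.toList_join, PySem.Chars.join_nil]
  | cons i rest ih =>
    intro msg
    cases rest with
    | nil =>
      apply String.ext
      simp [renderLoopA, PySem.Str.toList_join, PySem.Chars.join_singleton, String.toList_append]
    | cons j rest' =>
      rw [show renderLoopA inner msg (i :: j :: rest')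
            = renderLoopA inner
                (msg ++ i ++ " (" ++ PySem.Int.toStr (inner.getD i 0) ++ ")" ++ ", ") (j :: rest')
          from by simp [renderLoopA]]
      rw [ih]
      apply String.ext
      simp only [List.map_cons, PySem.Str.toList_join, String.toList_append,
        PySem.Chars.join_cons_cons, List.map_map]
      simp

theorem chunk_eq (inner : PySem.Dict String Int) (msg : String) (l : List String) :
    (if l.length = 1 then
        msg ++ PySem.List.pyGetD l 0 "" ++ " (" ++ PySem.Int.toStr (inner.getD (PySem.List.pyGetD l 0 "") 0) ++ ")"
      else renderLoopA inner msg l)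
    = msg ++ PySem.Str.join ", " (l.map (fun i => i ++ " (" ++ PySem.Int.toStr (inner.getD i 0) ++ ")")) := by
  match l with
  | [] => rw [if_neg (by simp)]; exact renderLoopA_eq inner [] msg
  | [i] =>
    rw [if_pos (by simp)]
    apply String.ext
    simp [PySem.Str.toList_join, PySem.Chars.join_singleton, String.toList_append,
      show PySem.List.pyGetD [i] 0 "" = i from rfl]
  | i :: j :: rest => rw [if_neg (by simp)]; exact renderLoopA_eq inner (i :: j :: rest) msg

theorem count_pair (ps : List (String × String)) (t i : String) :
    List.count i ((ps.filter (fun p => p.1 == t)).map (fun p => p.2)) = List.count (t, i) ps := by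
  rw [List.count_eq_countP, List.count_eq_countP, List.countP_map, List.countP_filter]
  apply List.countP_congr
  intro p _
  simp only [Function.comp_apply, show (p == (t, i)) = (p.1 == t && p.2 == i) from rfl,
    Bool.and_comm]

theorem insts_eq (ps : List (String × String)) (t : String) :
    PySem.List.sorted
        ((PySem.Dict.counter ((ps.filter (fun p => p.1 == t)).map (fun p => p.2))).keys) (fun x => x) false
      = PySem.List.sorted (((PySem.Dict.counter ps).keys.filter (fun p => p.1 == t)).map (fun p => p.2))
          (fun x => x) false := by
  rw [PySem.Dict.keys_counter, PySem.Dict.keys_counter]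
  apply PySem.List.sorted_eq_sorted_of_perm _ _ _ (fun a b h => h)
  have hnd2 : ((((PySem.Set.ofList ps).filter (fun p => p.1 == t)).map (fun p => p.2))).Nodup := by
    apply List.Nodup.map_on
    · intro x hx y hy hxy
      have hx' := (List.mem_filter.mp hx).2
      have hy' := (List.mem_filter.mp hy).2
      have h1 : x.1 = y.1 := by
        rw [beq_iff_eq] at hx' hy'; rw [hx', hy']
      exact Prod.ext h1 hxy
    · exact List.Nodup.filter _ (PySem.Set.nodup_ofList ps)
  apply (List.perm_ext_iff_of_nodup (PySem.Set.nodup_ofList _) hnd2).mpr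
  intro a
  simp only [PySem.Set.mem_ofList, List.mem_map, List.mem_filter]

theorem seg_eq (ps : List (String × String)) (t msg : String) :
    (if (PySem.List.sorted ((nestedF ps).getD t PySem.Dict.empty).keys (fun x => x) false).length = 1 then
        msg ++ PySem.List.pyGetD (PySem.List.sorted ((nestedF ps).getD t PySem.Dict.empty).keys (fun x => x) false) 0 ""
          ++ " (" ++ PySem.Int.toStr (((nestedF ps).getD t PySem.Dict.empty).getD
              (PySem.List.pyGetD (PySem.List.sorted ((nestedF ps).getD t PySem.Dict.empty).keys (fun x => x) false) 0 "") 0) ++ ")"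
      else renderLoopA ((nestedF ps).getD t PySem.Dict.empty) msg
        (PySem.List.sorted ((nestedF ps).getD t PySem.Dict.empty).keys (fun x => x) false))
    = msg ++ PySem.Str.join ", "
        ((PySem.List.sorted (((PySem.Dict.counter ps).keys.filter (fun p => p.1 == t)).map (fun p => p.2)) (fun x => x) false).map
          (fun inst => inst ++ " (" ++ PySem.Int.toStr ((PySem.Dict.counter ps).getD (t, inst) 0) ++ ")")) := by
  rw [chunk_eq, getD_nestedF, insts_eq]
  congr 1
  congr 1
  apply List.map_congr_left
  intro i _
  rw [PySem.Dict.getD_counter, PySem.Dict.getD_counter, count_pair]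

theorem pres_iff (ps : List (String × String)) (t : String) :
    (t ∈ (nestedF ps).keys) ↔
      (PySem.List.sorted (((PySem.Dict.counter ps).keys.filter (fun p => p.1 == t)).map (fun p => p.2))
        (fun x => x) false ≠ []) := by
  rw [keys_nestedF, PySem.Dict.keys_counter]
  simp only [ne_eq, PySem.List.sorted_eq_nil_iff, List.map_eq_nil_iff, List.filter_eq_nil_iff,
    PySem.Set.mem_ofList, List.mem_map]
  constructor
  · rintro ⟨p, hp, hpt⟩ h
    exact h p hp (by simp [hpt])
  · intro h
    push Not at h
    obtain ⟨p, hp, hpt⟩ := h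
    exact ⟨p, hp, by simpa using hpt⟩

theorem telDict_eq (dl : List String) :
    List.foldl (fun d line =>
        d.insert (PySem.Str.strip (PySem.List.pyGetD ((PySem.Str.split? line "|").getD []) 5 ""))
          ((d.getD (PySem.Str.strip (PySem.List.pyGetD ((PySem.Str.split? line "|").getD []) 5 ""))
              PySem.Dict.empty).modify
            (PySem.Str.strip (PySem.List.pyGetD ((PySem.Str.split? line "|").getD []) 6 "")) 0 (· + 1)))
      PySem.Dict.empty dl = nestedF (dl.map pairOf) := by
  unfold nestedF
  rw [List.foldl_map]
  rfl

theorem main_core (ps : List (String × String)) :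
    (List.foldl
        (fun (st : String × Int) telName =>
          if telName ∈ (nestedF ps).keys then
            (if (PySem.List.sorted ((nestedF ps).getD telName PySem.Dict.empty).keys fun x => x).length = 1 then
                (if st.2 > 0 then st.1 ++ "; " else st.1) ++ telName ++ " -- " ++
                        PySem.List.pyGetD
                          (PySem.List.sorted ((nestedF ps).getD telName PySem.Dict.empty).keys fun x => x) 0 "" ++
                      " (" ++
                    PySem.Int.toStr
                      (((nestedF ps).getD telName PySem.Dict.empty).getD
                        (PySem.List.pyGetD
                          (PySem.List.sorted ((nestedF ps).getD telName PySem.Dict.empty).keys fun x => x) 0 "")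
                        0) ++
                  ")"
              else
                renderLoopA ((nestedF ps).getD telName PySem.Dict.empty)
                  ((if st.2 > 0 then st.1 ++ "; " else st.1) ++ telName ++ " -- ")
                  (PySem.List.sorted ((nestedF ps).getD telName PySem.Dict.empty).keys fun x => x),
              st.2 + 1)
          else st)
        ("\n\t\t", 0) ["WHT", "INT", "JKT"]).1 =
    "\n\t\t" ++
      PySem.Str.join "; "
        (List.foldl
          (fun segs telName =>
            if
                (PySem.List.sorted
                    (List.map (fun x => x.2) (List.filter (fun p => p.1 == telName) (PySem.Dict.counter ps).keys))
                    fun x => x) ≠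
                  [] then
              segs ++
                [telName ++ " -- " ++
                    PySem.Str.join ", "
                      (List.map
                        (fun inst =>
                          inst ++ " (" ++ PySem.Int.toStr ((PySem.Dict.counter ps).getD (telName, inst) 0) ++ ")")
                        (PySem.List.sorted
                          (List.map (fun x => x.2) (List.filter (fun p => p.1 == telName) (PySem.Dict.counter ps).keys))
                          fun x => x))]
            else segs)
          [] ["WHT", "INT", "JKT"]) := by
  simp only [List.foldl_cons, List.foldl_nil, seg_eq]
  simp only [← pres_iff ps]
  by_cases hW : "WHT" ∈ (nestedF ps).keys <;>
  by_cases hI : "INT" ∈ (nestedF ps).keys <;>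
  by_cases hJ : "JKT" ∈ (nestedF ps).keys <;>
  all_goals (
    apply String.ext
    simp [hW, hI, hJ, String.toList_append, PySem.Str.toList_join, PySem.Chars.join_cons_cons,
      PySem.Chars.join_singleton, PySem.Chars.join_nil, List.append_assoc])

-- ----- B-side: sorted pair list decomposes into per-telescope blocks of runs -----

def ordL : List String := ["WHT", "INT", "JKT"]

def rkP (p : String × String) : Int × String :=
  ((((PySem.List.index? ordL p.1).getD 0 : Nat) : Int), p.2)

def qsOf (ps : List (String × String)) : List (Int × String) :=
  (ps.filter (fun p => decide (p.1 ∈ ordL))).map rkP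

def gListP (ps : List (String × String)) (t : String) : List String :=
  PySem.List.sorted (((PySem.Dict.counter ps).keys.filter (fun p => p.1 == t)).map (fun p => p.2))
    (fun x => x) false

def blockF (ps : List (String × String)) (r : Int) (t : String) : List (Int × String) :=
  (gListP ps t).flatMap (fun i => List.replicate (List.count (t, i) ps) (r, i))

theorem mem_gListP (ps : List (String × String)) (t i : String) :
    i ∈ gListP ps t ↔ (t, i) ∈ ps := by
  unfold gListP
  rw [PySem.List.mem_sorted, PySem.Dict.keys_counter]
  constructor
  · intro h
    obtain ⟨p, hp, hpi⟩ := List.mem_map.mp h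
    obtain ⟨hmem, ht⟩ := List.mem_filter.mp hp
    have : p = (t, i) := Prod.ext (by simpa using ht) hpi
    rw [this] at hmem
    exact (PySem.Set.mem_ofList _ _).mp hmem
  · intro h
    exact List.mem_map.mpr ⟨(t, i), List.mem_filter.mpr ⟨(PySem.Set.mem_ofList _ _).mpr h, by simp⟩, rfl⟩

theorem pairwise_lt_gListP (ps : List (String × String)) (t : String) :
    (gListP ps t).Pairwise (· < ·) := by
  have hle : (gListP ps t).Pairwise (· ≤ ·) := PySem.List.sorted_pairwise _ _
  have hnd : (gListP ps t).Nodup := by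
    apply (PySem.List.sorted_perm _ _ _).nodup_iff.mpr
    rw [PySem.Dict.keys_counter]
    apply List.Nodup.map_on
    · intro x hx y hy hxy
      have hx' := (List.mem_filter.mp hx).2
      have hy' := (List.mem_filter.mp hy).2
      have h1 : x.1 = y.1 := by rw [beq_iff_eq] at hx' hy'; rw [hx', hy']
      exact Prod.ext h1 hxy
    · exact List.Nodup.filter _ (PySem.Set.nodup_ofList ps)
  exact (hle.and hnd).imp (fun h => lt_of_le_of_ne h.1 h.2)

theorem count_flatMap_replicate (r : Int) (c : String → Nat) (gs : List String) (hnd : gs.Nodup)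
    (x : Int × String) :
    List.count x (gs.flatMap (fun i => List.replicate (c i) (r, i)))
      = if x.1 = r ∧ x.2 ∈ gs then c x.2 else 0 := by
  induction gs with
  | nil => simp
  | cons i gs ih =>
    rw [List.flatMap_cons, List.count_append, ih hnd.of_cons]
    rw [List.count_replicate]
    by_cases hx : x = (r, i)
    · subst hx
      have hni : (r, i).2 ∉ gs := (List.nodup_cons.mp hnd).1
      simp [hni]
    · have : ((r, i) == x) = false := by
        exact beq_eq_false_iff_ne.mpr (fun h => hx h.symm)
      rw [this]
      simp only [if_false, Bool.false_eq_true, zero_add]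
      by_cases h1 : x.1 = r
      · by_cases h2 : x.2 ∈ gs
        · simp only [h1, h2, List.mem_cons, or_true, and_true, if_pos trivial]
        · have : x.2 ≠ i := fun h => hx (Prod.ext h1 h)
          simp [h1, h2, this]
      · simp [h1]

theorem mem_blockF (ps : List (String × String)) (r : Int) (t : String) (q : Int × String)
    (h : q ∈ blockF ps r t) : q.1 = r := by
  unfold blockF at h
  obtain ⟨i, _, hq⟩ := List.mem_flatMap.mp h
  rw [List.eq_of_mem_replicate hq]

theorem count_blockF (ps : List (String × String)) (r : Int) (t : String) (x : Int × String) :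
    List.count x (blockF ps r t) = if x.1 = r ∧ (t, x.2) ∈ ps then List.count (t, x.2) ps else 0 := by
  have hnd : (gListP ps t).Nodup := (pairwise_lt_gListP ps t).nodup
  unfold blockF
  rw [count_flatMap_replicate r (fun i => List.count (t, i) ps) _ hnd x]
  simp only [mem_gListP]

theorem rkP_WHT (p : String × String) (h : p.1 = "WHT") : rkP p = (0, p.2) := by
  unfold rkP ordL; rw [h]; rfl

theorem rkP_INT (p : String × String) (h : p.1 = "INT") : rkP p = (1, p.2) := by
  unfold rkP ordL; rw [h]; rfl

theorem rkP_JKT (p : String × String) (h : p.1 = "JKT") : rkP p = (2, p.2) := by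
  unfold rkP ordL; rw [h]; rfl

theorem count_qsOf (ps : List (String × String)) (i : String) (r : Int) (t : String)
    (h : (r = 0 ∧ t = "WHT") ∨ (r = 1 ∧ t = "INT") ∨ (r = 2 ∧ t = "JKT")) :
    List.count (r, i) (qsOf ps) = List.count (t, i) ps := by
  unfold qsOf
  rw [List.count_eq_countP, List.countP_map, List.countP_filter, List.count_eq_countP]
  apply List.countP_congr
  intro p _
  simp only [Function.comp_apply]
  by_cases h1 : p.1 = "WHT"
  · rw [rkP_WHT p h1]
    rcases h with ⟨hr, ht⟩ | ⟨hr, ht⟩ | ⟨hr, ht⟩ <;> subst hr <;> subst ht <;>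
      simp [show ∀ (a b : Int) (x y : String), ((a,x) == (b,y)) = (a == b && x == y) from fun _ _ _ _ => rfl,
        show ∀ (x y : String) (u v : String), ((x,u) == (y,v)) = (x == y && u == v) from fun _ _ _ _ => rfl,
        ordL, h1]
  · by_cases h2 : p.1 = "INT"
    · rw [rkP_INT p h2]
      rcases h with ⟨hr, ht⟩ | ⟨hr, ht⟩ | ⟨hr, ht⟩ <;> subst hr <;> subst ht <;>
        simp [show ∀ (a b : Int) (x y : String), ((a,x) == (b,y)) = (a == b && x == y) from fun _ _ _ _ => rfl,
          show ∀ (x y : String) (u v : String), ((x,u) == (y,v)) = (x == y && u == v) from fun _ _ _ _ => rfl,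
          ordL, h2]
    · by_cases h3 : p.1 = "JKT"
      · rw [rkP_JKT p h3]
        rcases h with ⟨hr, ht⟩ | ⟨hr, ht⟩ | ⟨hr, ht⟩ <;> subst hr <;> subst ht <;>
          simp [show ∀ (a b : Int) (x y : String), ((a,x) == (b,y)) = (a == b && x == y) from fun _ _ _ _ => rfl,
            show ∀ (x y : String) (u v : String), ((x,u) == (y,v)) = (x == y && u == v) from fun _ _ _ _ => rfl,
            ordL, h3]
      · have hnm : p.1 ∉ ordL := by simp [ordL, h1, h2, h3]
        rcases h with ⟨hr, ht⟩ | ⟨hr, ht⟩ | ⟨hr, ht⟩ <;> subst hr <;> subst ht <;>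
          simp [show ∀ (x y : String) (u v : String), ((x,u) == (y,v)) = (x == y && u == v) from fun _ _ _ _ => rfl,
            hnm, h1, h2, h3]

theorem count_qsOf_other (ps : List (String × String)) (i : String) (r : Int)
    (hr : ¬(r = 0 ∨ r = 1 ∨ r = 2)) : List.count (r, i) (qsOf ps) = 0 := by
  rw [List.count_eq_zero]
  intro hmem
  unfold qsOf at hmem
  obtain ⟨p, hp, hpe⟩ := List.mem_map.mp hmem
  have hmemL : p.1 ∈ ordL := by
    have := (List.mem_filter.mp hp).2
    simpa using this
  have : p.1 = "WHT" ∨ p.1 = "INT" ∨ p.1 = "JKT" := by simpa [ordL] using hmemL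
  rcases this with h | h | h
  · rw [rkP_WHT p h] at hpe; exact hr (Or.inl (congrArg Prod.fst hpe).symm)
  · rw [rkP_INT p h] at hpe; exact hr (Or.inr (Or.inl (congrArg Prod.fst hpe).symm))
  · rw [rkP_JKT p h] at hpe; exact hr (Or.inr (Or.inr (congrArg Prod.fst hpe).symm))

theorem flat_perm (ps : List (String × String)) :
    (blockF ps 0 "WHT" ++ blockF ps 1 "INT" ++ blockF ps 2 "JKT").Perm (qsOf ps) := by
  rw [List.perm_iff_count]
  intro x
  rw [List.count_append, List.count_append, count_blockF, count_blockF, count_blockF]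
  obtain ⟨r, i⟩ := x
  by_cases h0 : r = 0
  · subst h0
    rw [count_qsOf ps i 0 "WHT" (Or.inl ⟨rfl, rfl⟩)]
    by_cases hm : ("WHT", i) ∈ ps
    · simp [hm]
    · simp [hm, List.count_eq_zero.mpr hm]
  · by_cases h1 : r = 1
    · subst h1
      rw [count_qsOf ps i 1 "INT" (Or.inr (Or.inl ⟨rfl, rfl⟩))]
      by_cases hm : ("INT", i) ∈ ps
      · simp [hm]
      · simp [hm, List.count_eq_zero.mpr hm]
    · by_cases h2 : r = 2
      · subst h2
        rw [count_qsOf ps i 2 "JKT" (Or.inr (Or.inr ⟨rfl, rfl⟩))]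
        by_cases hm : ("JKT", i) ∈ ps
        · simp [hm]
        · simp [hm, List.count_eq_zero.mpr hm]
      · rw [count_qsOf_other ps i r (by tauto)]
        simp [h0, h1, h2]

theorem pairwise_block (r : Int) (c : String → Nat) (gs : List String)
    (hp : gs.Pairwise (· < ·)) :
    (gs.flatMap (fun i => List.replicate (c i) (r, i))).Pairwise
      (fun a b : Int × String => toLex a ≤ toLex b) := by
  induction gs with
  | nil => simp
  | cons i gs ih =>
    rw [List.flatMap_cons, List.pairwise_append]
    refine ⟨List.pairwise_replicate.mpr (Or.inr le_rfl), ih hp.of_cons, ?_⟩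
    intro a ha b hb
    rw [List.eq_of_mem_replicate ha]
    obtain ⟨j, hj, hbj⟩ := List.mem_flatMap.mp hb
    rw [List.eq_of_mem_replicate hbj]
    have hij : i < j := (List.pairwise_cons.mp hp).1 j hj
    rw [Prod.Lex.toLex_le_toLex]
    exact Or.inr ⟨rfl, le_of_lt hij⟩

theorem pairwise_flat (ps : List (String × String)) :
    (blockF ps 0 "WHT" ++ blockF ps 1 "INT" ++ blockF ps 2 "JKT").Pairwise
      (fun a b : Int × String => toLex a ≤ toLex b) := by
  rw [List.pairwise_append, List.pairwise_append]
  refine ⟨⟨pairwise_block 0 _ _ (pairwise_lt_gListP ps "WHT"),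
    pairwise_block 1 _ _ (pairwise_lt_gListP ps "INT"), ?_⟩,
    pairwise_block 2 _ _ (pairwise_lt_gListP ps "JKT"), ?_⟩
  · intro a ha b hb
    rw [Prod.Lex.toLex_le_toLex, mem_blockF ps 1 "INT" b hb, mem_blockF ps 0 "WHT" a ha]
    exact Or.inl (by norm_num)
  · intro a ha b hb
    rw [Prod.Lex.toLex_le_toLex, mem_blockF ps 2 "JKT" b hb]
    rcases List.mem_append.mp ha with h | h
    · rw [mem_blockF ps 0 "WHT" a h]; exact Or.inl (by norm_num)
    · rw [mem_blockF ps 1 "INT" a h]; exact Or.inl (by norm_num)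

theorem sorted2_eq_sorted_toLex (xs : List (Int × String)) :
    PySem.List.sorted2 xs (fun p => p.1) (fun p => p.2) false
      = PySem.List.sorted xs (fun p => toLex p) false := by
  have hbefore : (fun (a b : Int × String) =>
        (decide (a.1 < b.1) || (!decide (b.1 < a.1) && decide (a.2 < b.2))))
      = (fun (a b : Int × String) => decide (toLex a < toLex b)) := by
    funext a b
    apply Bool.eq_iff_iff.mpr
    simp only [Bool.or_eq_true, Bool.and_eq_true, Bool.not_eq_true',
      decide_eq_true_eq, decide_eq_false_iff_not, Prod.Lex.toLex_lt_toLex]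
    constructor
    · rintro (h | ⟨h2, h3⟩)
      · exact Or.inl h
      · rcases lt_trichotomy a.1 b.1 with h1 | h1 | h1
        · exact Or.inl h1
        · exact Or.inr ⟨h1, h3⟩
        · exact absurd h1 h2
    · rintro (h | ⟨h2, h3⟩)
      · exact Or.inl h
      · exact Or.inr ⟨by rw [h2]; exact lt_irrefl _, h3⟩
  show xs.foldl _ [] = xs.foldl _ []
  rw [hbefore]

theorem flat_eq (ps : List (String × String)) :
    PySem.List.sorted2 (qsOf ps) (fun p => p.1) (fun p => p.2) false
      = blockF ps 0 "WHT" ++ blockF ps 1 "INT" ++ blockF ps 2 "JKT" := by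
  rw [sorted2_eq_sorted_toLex]
  rw [PySem.List.sorted_eq_sorted_of_perm _ _ _ toLex.injective (flat_perm ps).symm]
  exact PySem.List.sorted_eq_self_of_pairwise _ _ (pairwise_flat ps)

theorem takeWhile_replicate_append {α : Type} [BEq α] [LawfulBEq α] (x : α) (c : Nat)
    (rest : List α) (hhd : ∀ q ∈ rest.head?, (q == x) = false) :
    (List.replicate c x ++ rest).takeWhile (fun q => q == x) = List.replicate c x ∧
    (List.replicate c x ++ rest).dropWhile (fun q => q == x) = rest := by
  induction c with
  | zero =>
    simp only [List.replicate_zero, List.nil_append]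
    cases rest with
    | nil => simp
    | cons a l =>
      have := hhd a (by simp)
      simp [this]
  | succ n ih =>
    simp only [List.replicate_succ, List.cons_append, List.takeWhile_cons, List.dropWhile_cons,
      beq_self_eq_true, if_true]
    exact ⟨by rw [ih.1], by rw [ih.2]⟩

theorem renderRuns_nil (order : List String) (msg : String) (prev : Option Int) :
    renderRuns order msg prev [] = msg := by
  rw [renderRuns.eq_def]

theorem renderRuns_cons (order : List String) (msg : String) (prev : Option Int) (r : Int)
    (i : String) (l : List (Int × String)) :
    renderRuns order msg prev ((r, i) :: l) =
      renderRuns order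
        ((match prev with
          | none => msg ++ PySem.List.pyGetD order r "" ++ " -- "
          | some pr => if r == pr then msg ++ ", "
                       else msg ++ "; " ++ PySem.List.pyGetD order r "" ++ " -- ")
          ++ i ++ " (" ++ PySem.Int.toStr (((l.takeWhile (fun q => q == (r, i))).length : Int) + 1) ++ ")")
        (some r) (l.dropWhile (fun q => q == (r, i))) := by
  rw [renderRuns.eq_def]

theorem runRender (order : List String) (msg : String) (prev : Option Int) (r : Int) (i : String)
    (c : Nat) (hc : 1 ≤ c) (rest : List (Int × String))
    (hhd : ∀ q ∈ rest.head?, (q == (r, i)) = false) :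
    renderRuns order msg prev (List.replicate c (r, i) ++ rest)
      = renderRuns order
          ((match prev with
            | none => msg ++ PySem.List.pyGetD order r "" ++ " -- "
            | some pr => if r == pr then msg ++ ", "
                         else msg ++ "; " ++ PySem.List.pyGetD order r "" ++ " -- ")
            ++ i ++ " (" ++ PySem.Int.toStr (c : Int) ++ ")")
          (some r) rest := by
  obtain ⟨c', rfl⟩ : ∃ c', c = c' + 1 := ⟨c - 1, by omega⟩
  rw [List.replicate_succ, List.cons_append, renderRuns_cons]
  rw [(takeWhile_replicate_append (r, i) c' rest hhd).1,
    (takeWhile_replicate_append (r, i) c' rest hhd).2]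
  congr 4
  rw [List.length_replicate]
  push_cast
  ring

theorem blockRender (order : List String) (r : Int) (c : String → Nat)
    (gs : List String) (rest : List (Int × String))
    (hp : gs.Pairwise (· < ·)) (hc : ∀ i ∈ gs, 1 ≤ c i) (hrest : ∀ q ∈ rest, q.1 ≠ r) :
    ∀ (msg : String) (prev : Option Int),
    renderRuns order msg prev (gs.flatMap (fun i => List.replicate (c i) (r, i)) ++ rest)
      = if gs.isEmpty then renderRuns order msg prev rest
        else renderRuns order
          ((match prev with
            | none => msg ++ PySem.List.pyGetD order r "" ++ " -- "
            | some pr => if r == pr then msg ++ ", "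
                         else msg ++ "; " ++ PySem.List.pyGetD order r "" ++ " -- ")
            ++ PySem.Str.join ", " (gs.map (fun i => i ++ " (" ++ PySem.Int.toStr ((c i : Nat) : Int) ++ ")")))
          (some r) rest := by
  revert hp hc
  induction gs with
  | nil => intro _ _ msg prev; simp
  | cons i gs ih =>
    intro hp hc msg prev
    rw [List.flatMap_cons, List.append_assoc]
    have hhd : ∀ q ∈ (gs.flatMap (fun j => List.replicate (c j) (r, j)) ++ rest).head?,
        (q == (r, i)) = false := by
      intro q hq
      rw [Option.mem_def] at hq
      cases gs with
      | nil =>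
        simp only [List.flatMap_nil, List.nil_append] at hq
        have hqm : q ∈ rest := List.mem_of_mem_head? (Option.mem_def.mpr hq)
        exact beq_eq_false_iff_ne.mpr (fun h => hrest q hqm (by rw [h]))
      | cons j gs' =>
        obtain ⟨n, hn⟩ : ∃ n, c j = n + 1 := ⟨c j - 1, by have := hc j (by simp); omega⟩
        rw [List.flatMap_cons, hn, List.replicate_succ, List.cons_append, List.cons_append,
          List.head?_cons] at hq
        have hq' : q = (r, j) := (Option.some.injEq _ _).mp hq.symm
        have hij : i < j := (List.pairwise_cons.mp hp).1 j (by simp)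
        subst hq'
        exact beq_eq_false_iff_ne.mpr
          (fun h => absurd (congrArg Prod.snd h) (fun h2 => absurd h2 (ne_of_gt hij)))
    rw [runRender order msg prev r i (c i) (hc i (by simp)) _ hhd]
    rw [ih hp.of_cons (fun j hj => hc j (by simp [hj]))]
    cases gs with
    | nil =>
      simp only [List.isEmpty_nil, if_true, List.isEmpty_cons, Bool.false_eq_true, if_false]
      congr 1
      apply String.ext
      simp [PySem.Str.toList_join, PySem.Chars.join_singleton, String.toList_append]
    | cons j gs' =>
      simp only [List.isEmpty_cons, Bool.false_eq_true, if_false, beq_self_eq_true, if_true]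
      congr 1
      apply String.ext
      simp only [List.map_cons, PySem.Str.toList_join, String.toList_append,
        PySem.Chars.join_cons_cons, List.map_map]
      simp

theorem render_eq (ps : List (String × String)) :
    renderRuns ["WHT", "INT", "JKT"] "\n\t\t" none
        (PySem.List.sorted2 (qsOf ps) (fun p => p.1) (fun p => p.2) false)
      = "\n\t\t" ++
        PySem.Str.join "; "
          (List.foldl
            (fun segs telName =>
              if gListP ps telName ≠ [] then
                segs ++
                  [telName ++ " -- " ++
                      PySem.Str.join ", "
                        ((gListP ps telName).map
                          (fun inst => inst ++ " (" ++ PySem.Int.toStr ((List.count (telName, inst) ps : Nat) : Int) ++ ")"))]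
              else segs)
            [] ["WHT", "INT", "JKT"]) := by
  rw [flat_eq]
  simp only [blockF, List.append_assoc]
  have hcW : ∀ i ∈ gListP ps "WHT", 1 ≤ List.count ("WHT", i) ps :=
    fun i hi => List.count_pos_iff.mpr ((mem_gListP ps "WHT" i).mp hi)
  have hcI : ∀ i ∈ gListP ps "INT", 1 ≤ List.count ("INT", i) ps :=
    fun i hi => List.count_pos_iff.mpr ((mem_gListP ps "INT" i).mp hi)
  have hcJ : ∀ i ∈ gListP ps "JKT", 1 ≤ List.count ("JKT", i) ps :=
    fun i hi => List.count_pos_iff.mpr ((mem_gListP ps "JKT" i).mp hi)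
  have h0 : ∀ q ∈ ((gListP ps "INT").flatMap (fun i => List.replicate (List.count ("INT", i) ps) ((1 : Int), i))
        ++ (gListP ps "JKT").flatMap (fun i => List.replicate (List.count ("JKT", i) ps) ((2 : Int), i))),
      q.1 ≠ (0 : Int) := by
    intro q hq
    rcases List.mem_append.mp hq with h | h
    · rw [mem_blockF ps 1 "INT" q h]; norm_num
    · rw [mem_blockF ps 2 "JKT" q h]; norm_num
  have h1 : ∀ q ∈ (gListP ps "JKT").flatMap (fun i => List.replicate (List.count ("JKT", i) ps) ((2 : Int), i)),
      q.1 ≠ (1 : Int) := by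
    intro q hq
    rw [mem_blockF ps 2 "JKT" q hq]; norm_num
  rw [blockRender ["WHT", "INT", "JKT"] 0 (fun i => List.count ("WHT", i) ps) (gListP ps "WHT") _
    (pairwise_lt_gListP ps "WHT") hcW h0 "\n\t\t" none]
  simp only [blockRender ["WHT", "INT", "JKT"] 1 (fun i => List.count ("INT", i) ps) (gListP ps "INT") _
    (pairwise_lt_gListP ps "INT") hcI h1]
  rw [show (gListP ps "JKT").flatMap (fun i => List.replicate (List.count ("JKT", i) ps) ((2 : Int), i))
      = (gListP ps "JKT").flatMap (fun i => List.replicate (List.count ("JKT", i) ps) ((2 : Int), i)) ++ []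
    from (List.append_nil _).symm]
  simp only [blockRender ["WHT", "INT", "JKT"] 2 (fun i => List.count ("JKT", i) ps) (gListP ps "JKT") []
    (pairwise_lt_gListP ps "JKT") hcJ (by simp)]
  simp only [renderRuns_nil, List.foldl_cons, List.foldl_nil]
  by_cases hW : gListP ps "WHT" = [] <;> by_cases hI : gListP ps "INT" = [] <;>
    by_cases hJ : gListP ps "JKT" = [] <;>
  all_goals (
    simp only [hW, hI, hJ, List.isEmpty_nil, List.isEmpty_iff, ne_eq, not_true, not_false_iff,
      if_true, if_false]
    apply String.ext
    simp [String.toList_append, PySem.Str.toList_join,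
      PySem.Chars.join_cons_cons, PySem.Chars.join_singleton, PySem.Chars.join_nil,
      List.append_assoc,
      show PySem.List.pyGetD ["WHT", "INT", "JKT"] 0 "" = "WHT" from rfl,
      show PySem.List.pyGetD ["WHT", "INT", "JKT"] 1 "" = "INT" from rfl,
      show PySem.List.pyGetD ["WHT", "INT", "JKT"] 2 "" = "JKT" from rfl])

theorem filtmap_eq_qsOf (dl : List String) :
    (List.filter (fun line => decide (PySem.Str.strip (PySem.List.pyGetD ((PySem.Str.split? line "|").getD []) 5 "")
        ∈ ["WHT", "INT", "JKT"])) dl).map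
      (fun line => ((((PySem.List.index? ["WHT", "INT", "JKT"]
            (PySem.Str.strip (PySem.List.pyGetD ((PySem.Str.split? line "|").getD []) 5 ""))).getD 0 : Nat) : Int),
          PySem.Str.strip (PySem.List.pyGetD ((PySem.Str.split? line "|").getD []) 6 "")))
      = qsOf (dl.map pairOf) := by
  unfold qsOf
  rw [List.filter_map, List.map_map]
  have hp : ((fun p : String × String => decide (p.1 ∈ ordL)) ∘ pairOf)
      = (fun line => decide (PySem.Str.strip (PySem.List.pyGetD ((PySem.Str.split? line "|").getD []) 5 "")
          ∈ ["WHT", "INT", "JKT"])) := by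
    funext line
    simp only [Function.comp_apply]
    rw [decide_eq_decide]
    unfold ordL pairOf
    exact Iff.rfl
  rw [hp]
  apply List.map_congr_left
  intro line _
  simp only [Function.comp_apply]
  unfold rkP pairOf ordL
  rfl

-- ===== VERDICT (by name: the statement is the Claim_ definition above) =====
theorem FindTelescopesAndInstruments_spec : Claim_equal_FindTelescopesAndInstruments := by
  intro inputText nFound _
  show FindTelescopesAndInstruments inputText nFound = FindTelescopesAndInstruments_alt inputText nFound
  simp only [FindTelescopesAndInstruments, FindTelescopesAndInstruments_alt, GetObsTextLines]
  simp only [addEntry_eq]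
  rw [PySem.List.foldl_ite_eq_foldl_filter
    (fun line => 10 ≤ ((PySem.Str.split? line "|").getD []).length)]
  rw [PySem.List.foldl_append_ite
    (fun line => PySem.Str.strip (PySem.List.pyGetD ((PySem.Str.split? line "|").getD []) 5 "")
        ∈ ["WHT", "INT", "JKT"])
    (fun line => ((((PySem.List.index? ["WHT", "INT", "JKT"]
          (PySem.Str.strip (PySem.List.pyGetD ((PySem.Str.split? line "|").getD []) 5 ""))).getD 0 : Nat) : Int),
        PySem.Str.strip (PySem.List.pyGetD ((PySem.Str.split? line "|").getD []) 6 "")))]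
  rw [List.nil_append, filtmap_eq_qsOf, telDict_eq]
  generalize (List.filter (fun line => decide (10 ≤ ((PySem.Str.split? line "|").getD []).length))
      (PySem.List.slice ((PySem.Str.split? (PySem.Str.replace inputText "&nbsp;" " ") "<br>").getD [])
        (some (List.foldl
          (fun si i => if PySem.Str.find (PySem.List.pyGetD ((PySem.Str.split? (PySem.Str.replace inputText "&nbsp;" " ") "<br>").getD []) i "") "---+---" > 0 then i else si)
          (-99)
          (PySem.List.pyRange 0 (((PySem.Str.split? (PySem.Str.replace inputText "&nbsp;" " ") "<br>").getD []).length : Int) 1)))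
        none)).map pairOf = ps
  rw [render_eq ps, main_core ps]
  simp only [PySem.Dict.getD_counter]
  rfl
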